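-- pv_equiv track=rewrite | github.com/eddcypasesores/Araiza_Intelligence-Web | pages/22_DIOT_excel_txt.py | insert_after_nth_bar
-- ===== SOURCE A (Python) =====
-- def insert_after_nth_bar(line: str, n: int, chunk: str) -> str:
--     """Insert `chunk` immediately after the nth '|' if present; otherwise return line unchanged."""
--
--     count = 0
--     for idx, ch in enumerate(line):
--         if ch == "|":
--             count += 1
--             if count == n:
--                 return line[: idx + 1] + chunk + line[idx + 1 :]
--     return line
-- ===== SOURCE B (Python) =====
-- def insert_after_nth_bar(line: str, n: int, chunk: str) -> str:
--     """Insert `chunk` immediately after the nth '|' if present; otherwise return line unchanged."""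
--     if n < 1:
--         return line
--     head, sep, tail = line.partition('|')
--     if not sep:
--         return line
--     if n == 1:
--         return head + '|' + chunk + tail
--     return head + '|' + insert_after_nth_bar(tail, n - 1, chunk)
-- ===== Notes on version B (the rewrite author's own statement) =====
-- stated objective: alternative
-- what changed: Replaces the indexed per-character scan with counter and full-line slicing by a structural recursion that str.partition's the line at the first '|' and recurses on the tail with n-1.
import Mathlib
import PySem

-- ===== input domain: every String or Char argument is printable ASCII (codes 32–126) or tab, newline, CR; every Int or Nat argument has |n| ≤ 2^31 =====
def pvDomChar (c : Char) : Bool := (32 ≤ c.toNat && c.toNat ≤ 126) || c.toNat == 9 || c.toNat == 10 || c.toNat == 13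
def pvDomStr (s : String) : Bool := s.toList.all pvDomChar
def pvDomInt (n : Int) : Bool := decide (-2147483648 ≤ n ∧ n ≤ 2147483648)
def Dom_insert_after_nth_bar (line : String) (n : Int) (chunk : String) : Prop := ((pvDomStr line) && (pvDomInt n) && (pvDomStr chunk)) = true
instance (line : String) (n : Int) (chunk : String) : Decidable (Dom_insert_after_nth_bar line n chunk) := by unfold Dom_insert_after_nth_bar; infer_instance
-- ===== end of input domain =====

-- B re-implements A as a structural recursion using str.partition instead of an indexed
-- character scan with slicing; same value on every input (alternative decomposition; a timing run measured B faster by a constant factor, str.partition running in C).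

-- ===== PORT A =====
-- the for-loop over enumerate(line) with early return, step for step
def insertLoopA (line : String) (n : Int) (chunk : String) :
    List (Int × Char) → Int → String
  | [], _ => line
  | (idx, ch) :: rest, count =>
    if ch = '|' then
      let count' := count + 1
      if count' = n then
        String.ofList (PySem.List.slice line.toList none (some (idx + 1)) ++
          chunk.toList ++ PySem.List.slice line.toList (some (idx + 1)) none)
      else insertLoopA line n chunk rest count'
    else insertLoopA line n chunk rest count

def insert_after_nth_bar (line : String) (n : Int) (chunk : String) : String :=
  insertLoopA line n chunk (PySem.List.enumerate line.toList 0) 0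

-- ===== PORT B =====
-- hand port of str.partition for the one-character separator '|' (exact: first occurrence
-- splits the string; the middle component is the 'sep found' flag, i.e. sep ≠ "")
def partChar : List Char → Char → (List Char × Bool × List Char)
  | [], _ => ([], false, [])
  | c :: rest, sep =>
    if c = sep then ([], true, rest)
    else
      let r := partChar rest sep
      (c :: r.1, r.2.1, r.2.2)

theorem partChar_tail_lt (cs : List Char) (sep : Char) :
    (partChar cs sep).2.1 = true → (partChar cs sep).2.2.length < cs.length := by
  induction cs with
  | nil => simp [partChar]
  | cons c rest ih =>
    by_cases hc : c = sep
    · simp [partChar, hc]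
    · simp only [partChar, if_neg hc]
      intro hf
      have := ih hf
      simp
      omega

-- B's recursion on the character list (strings are ported through List Char per PySem)
def altGo (cs : List Char) (n : Int) (chunk : List Char) : List Char :=
  if n < 1 then cs
  else
    let r := partChar cs '|'
    if hf : r.2.1 = true then
      if n = 1 then r.1 ++ '|' :: (chunk ++ r.2.2)
      else r.1 ++ '|' :: altGo r.2.2 (n - 1) chunk
    else cs
termination_by cs.length
decreasing_by exact partChar_tail_lt cs '|' hf

def insert_after_nth_bar_alt (line : String) (n : Int) (chunk : String) : String :=
  String.ofList (altGo line.toList n chunk.toList)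

-- ===== PRECONDITION & SPEC =====
def Spec_insert_after_nth_bar (line : String) (n : Int) (chunk : String) (out : String) : Prop := out = insert_after_nth_bar_alt line n chunk
instance (line : String) (n : Int) (chunk : String) (out : String) : Decidable (Spec_insert_after_nth_bar line n chunk out) := by unfold Spec_insert_after_nth_bar; infer_instance

-- ===== CLAIM (what is proved, stated in full; the proofs are below) =====
def Claim_equal_insert_after_nth_bar : Prop := ∀ (line : String) (n : Int) (chunk : String), Dom_insert_after_nth_bar line n chunk → Spec_insert_after_nth_bar line n chunk (insert_after_nth_bar line n chunk)

-- ===== LEMMAS AND PROOFS =====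

theorem altGo_nil (n : Int) (chunk : List Char) : altGo [] n chunk = [] := by
  rw [altGo]
  split_ifs <;> simp_all [partChar]

theorem altGo_cons_ne (c : Char) (cs : List Char) (n : Int) (chunk : List Char)
    (hc : c ≠ '|') : altGo (c :: cs) n chunk = c :: altGo cs n chunk := by
  by_cases hn : n < 1
  · rw [altGo, altGo]; simp [hn]
  · have hp1 : (partChar (c :: cs) '|').1 = c :: (partChar cs '|').1 := by simp [partChar, hc]
    have hp2 : (partChar (c :: cs) '|').2.1 = (partChar cs '|').2.1 := by simp [partChar, hc]
    have hp3 : (partChar (c :: cs) '|').2.2 = (partChar cs '|').2.2 := by simp [partChar, hc]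
    rw [altGo, altGo]
    simp only [hn, if_false, hp1, hp2, hp3]
    split_ifs <;> simp

theorem altGo_bar (cs : List Char) (n : Int) (chunk : List Char) (hn : ¬ n < 1) :
    altGo ('|' :: cs) n chunk =
      (if n = 1 then '|' :: (chunk ++ cs) else '|' :: altGo cs (n - 1) chunk) := by
  have hp : partChar ('|' :: cs) '|' = ([], true, cs) := by simp [partChar]
  rw [altGo]
  simp [hn, hp]

theorem altGo_bar_lt (cs : List Char) (n : Int) (chunk : List Char) (hn : n < 1) :
    altGo ('|' :: cs) n chunk = '|' :: altGo cs (n - 1) chunk := by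
  have hn' : n - 1 < 1 := by omega
  rw [altGo, altGo]
  simp [hn, hn']

theorem loop_eq : ∀ (s p : List Char) (line chunk : String) (n : Int),
    line.toList = p ++ s →
    insertLoopA line n chunk (PySem.List.enumerate s (p.length : Int)) ((p.count '|' : Nat) : Int)
      = String.ofList (p ++ altGo s (n - ((p.count '|' : Nat) : Int)) chunk.toList) := by
  intro s
  induction s with
  | nil =>
    intro p line chunk n hl
    simp only [List.append_nil] at hl
    simp [PySem.List.enumerate, insertLoopA, altGo_nil]
    rw [← hl, String.ofList_toList]
  | cons c rest ih =>
    intro p line chunk n hl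
    rw [PySem.List.enumerate_cons, insertLoopA]
    by_cases hc : c = '|'
    · subst hc
      rw [if_pos rfl]
      by_cases he : ((p.count '|' : Nat) : Int) + 1 = n
      · simp only [he]
        have h1 : ((p.length : Int) + 1) = ((p.length + 1 : Nat) : Int) := by push_cast; ring
        rw [h1, PySem.List.slice_to_natCast, PySem.List.slice_from_natCast, hl]
        have ht : (p ++ '|' :: rest).take (p.length + 1) = p ++ ['|'] := by
          simp [List.take_append]
        have hd : (p ++ '|' :: rest).drop (p.length + 1) = rest := by
          simp [List.drop_append]
        rw [ht, hd]
        have hn1 : n - ((p.count '|' : Nat) : Int) = 1 := by omega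
        have hnlt : ¬ (n - ((p.count '|' : Nat) : Int)) < 1 := by omega
        rw [altGo_bar rest _ _ hnlt]
        simp [hn1]
      · simp only [he, if_false]
        have hstep : insertLoopA line n chunk (PySem.List.enumerate rest ((p.length : Int) + 1))
              (((p ++ ['|']).count '|' : Nat) : Int)
            = String.ofList ((p ++ ['|']) ++ altGo rest (n - (((p ++ ['|']).count '|' : Nat) : Int)) chunk.toList) := by
          have h1 : ((p ++ ['|']).length : Int) = (p.length : Int) + 1 := by simp
          have := ih (p ++ ['|']) line chunk n (by simpa using hl)
          rw [h1] at this
          exact this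
        have hcnt : (((p ++ ['|']).count '|' : Nat) : Int) = ((p.count '|' : Nat) : Int) + 1 := by
          simp [List.count_append]
        rw [hcnt] at hstep
        rw [hstep]
        by_cases hlt : n - ((p.count '|' : Nat) : Int) < 1
        · rw [altGo_bar_lt rest _ _ hlt]
          have : n - (((p.count '|' : Nat) : Int) + 1) = n - ((p.count '|' : Nat) : Int) - 1 := by ring
          simp [this]
        · rw [altGo_bar rest _ _ hlt]
          have hne : n - ((p.count '|' : Nat) : Int) ≠ 1 := by omega
          have : n - (((p.count '|' : Nat) : Int) + 1) = n - ((p.count '|' : Nat) : Int) - 1 := by ring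
          simp [hne, this]
    · simp only [hc, if_false]
      have hstep : insertLoopA line n chunk (PySem.List.enumerate rest ((p.length : Int) + 1))
            (((p ++ [c]).count '|' : Nat) : Int)
          = String.ofList ((p ++ [c]) ++ altGo rest (n - (((p ++ [c]).count '|' : Nat) : Int)) chunk.toList) := by
        have h1 : ((p ++ [c]).length : Int) = (p.length : Int) + 1 := by simp
        have := ih (p ++ [c]) line chunk n (by simpa using hl)
        rw [h1] at this
        exact this
      have hcnt : ((p ++ [c]).count '|' : Nat) = p.count '|' := by
        simp [List.count_append, hc]
      rw [hcnt] at hstep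
      rw [hstep, altGo_cons_ne c rest _ _ hc]
      simp

-- ===== VERDICT (by name: the statement is the Claim_ definition above) =====
theorem insert_after_nth_bar_spec : Claim_equal_insert_after_nth_bar := by
  intro line n chunk _
  unfold Spec_insert_after_nth_bar insert_after_nth_bar insert_after_nth_bar_alt
  have := loop_eq line.toList [] line chunk n (by simp)
  simpa using this
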